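-- pv_equiv track=rewrite | github.com/ab14jain/GrowTogether | Leet Code Questions/2071_maxTaskAssign.py | can_assign
-- ===== SOURCE A (Python) =====
-- import bisect
--
-- def can_assign(mid, workers, tasks, pills, strength):
--     usable_workers = sorted(workers[-mid:])
--     for i in range(mid - 1, -1, -1):
--         task = tasks[i]
--         if usable_workers[-1] >= task:
--             usable_workers.pop()
--         else:
--             if pills <= 0:
--                 return False
--             # Find the weakest worker who can do the task with pill
--             idx = bisect.bisect_left(usable_workers, task - strength)
--             if idx == len(usable_workers):
--                 return False
--             pills -= 1
--             usable_workers.pop(idx)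
--     return True
-- ===== SOURCE B (Python) =====
-- import bisect
--
-- def can_assign(mid, workers, tasks, pills, strength):
--     # Same greedy decisions as the original, but the pool of still-available workers
--     # lives in a persistent segment tree of alive-counts over the sorted worker array:
--     # "take the strongest" and "take the weakest boostable" are tree-path descents
--     # instead of a bisect plus a middle-of-list pop.
--     if mid <= 0:
--         return True
--     if mid > len(workers) or mid > len(tasks):
--         return False
--     w = sorted(workers[-mid:])
--     n = len(w)
--
--     def build(size):
--         if size == 1:
--             return (1, None, None)
--         h = size // 2
--         return (size, build(h), build(size - h))
--
--     def max_alive(node, size):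
--         # rightmost alive position (relative), assuming node[0] > 0
--         if size == 1:
--             return 0
--         h = size // 2
--         if node[2][0] > 0:
--             return h + max_alive(node[2], size - h)
--         return max_alive(node[1], h)
--
--     def first_alive(node, size, pos):
--         # smallest alive position >= pos, or None
--         if node[0] == 0 or pos >= size:
--             return None
--         if size == 1:
--             return 0
--         h = size // 2
--         r = first_alive(node[1], h, pos)
--         if r is not None:
--             return r
--         r = first_alive(node[2], size - h, pos - h)
--         return None if r is None else h + r
--
--     def remove(node, size, pos):
--         if size == 1:
--             return (0, None, None)
--         h = size // 2
--         if pos < h: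
--             return (node[0] - 1, remove(node[1], h, pos), node[2])
--         return (node[0] - 1, node[1], remove(node[2], size - h, pos - h))
--
--     root = build(n)
--     for t in reversed(tasks[:mid]):
--         p = max_alive(root, n)
--         if w[p] >= t:
--             root = remove(root, n, p)
--         else:
--             if pills <= 0:
--                 return False
--             pos = bisect.bisect_left(w, t - strength)
--             q = first_alive(root, n, pos)
--             if q is None:
--                 return False
--             pills -= 1
--             root = remove(root, n, q)
--     return True
-- ===== Notes on version B (the rewrite author's own statement) =====
-- stated objective: alternative
-- what changed: The pool of still-available workers is kept in a persistent segment tree of alive-counts over the sorted worker array (take-strongest / take-weakest-boostable / delete in O(log m) tree path rebuilds) instead of a Python list with bisect and middle-of-list pop; a different traversal/maintenance structure; CPython's C-level list pops keep A at least as fast in measured runs, so no speed is claimed.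
-- outside the precondition, e.g. on can_assign(2, [1], [5, 5], 0, 0): A returns False, B returns False
import Mathlib
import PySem

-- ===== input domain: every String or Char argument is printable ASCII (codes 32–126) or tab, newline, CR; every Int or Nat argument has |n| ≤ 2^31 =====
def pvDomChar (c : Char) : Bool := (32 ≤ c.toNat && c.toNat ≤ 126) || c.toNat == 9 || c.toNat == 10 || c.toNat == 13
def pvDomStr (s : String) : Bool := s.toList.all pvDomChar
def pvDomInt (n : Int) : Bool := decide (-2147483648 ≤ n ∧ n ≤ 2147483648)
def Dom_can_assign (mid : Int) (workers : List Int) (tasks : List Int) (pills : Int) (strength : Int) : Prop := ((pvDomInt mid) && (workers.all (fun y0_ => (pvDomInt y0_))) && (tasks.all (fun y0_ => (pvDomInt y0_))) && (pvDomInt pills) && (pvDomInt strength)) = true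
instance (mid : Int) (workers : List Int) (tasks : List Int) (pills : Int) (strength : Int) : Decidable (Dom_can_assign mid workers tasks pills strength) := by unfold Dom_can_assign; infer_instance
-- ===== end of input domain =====

-- B makes the same greedy decisions as A but keeps the pool of available workers in a
-- segment tree of alive-counts over the sorted worker array instead of a list with
-- bisect and middle-of-list pops (a different data structure; timing label: not faster).

-- ===== PORT A =====
-- the for-loop of A over range(mid-1, -1, -1), with its early returns
def aLoop (tasks : List Int) (strength : Int) : List Int → List Int → Int → Bool
  | [], _, _ => true
  | i :: rest, usable, pills =>
    match PySem.List.pyGet? tasks i with            -- task = tasks[i]  (none = IndexError)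
    | none => false
    | some task =>
      match PySem.List.pyGet? usable (-1) with      -- usable_workers[-1]  (none = IndexError)
      | none => false
      | some last =>
        if task ≤ last then
          match PySem.List.pop? usable (-1) with    -- usable_workers.pop()
          | none => false
          | some r => aLoop tasks strength rest r.2 pills
        else if pills ≤ 0 then false
        else
          let idx := PySem.List.bisectLeft usable (task - strength)
          if idx = usable.length then false
          else
            match PySem.List.pop? usable (idx : Int) with   -- usable_workers.pop(idx)
            | none => false
            | some r => aLoop tasks strength rest r.2 (pills - 1)

def can_assign (mid : Int) (workers : List Int) (tasks : List Int) (pills : Int) (strength : Int) : Bool :=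
  let usable := PySem.List.sorted (PySem.List.slice workers (some (-mid)) none) (fun x => x)
  aLoop tasks strength (PySem.List.pyRange (mid - 1) (-1) (-1)) usable pills

-- ===== PORT B =====
-- segment tree node: stored count of alive positions, children (leaf = Python (c, None, None))
inductive SegT : Type
  | leaf : Int → SegT
  | node : Int → SegT → SegT → SegT
deriving DecidableEq, Repr

def cntOf : SegT → Int
  | .leaf c => c
  | .node c _ _ => c

-- build(size): Python recurses only on size ≥ 1; the '≤ 1' (instead of '== 1') makes it total
def buildT (size : Int) : SegT :=
  if size ≤ 1 then .leaf 1
  else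
    let h := PySem.Int.floordiv size 2
    .node size (buildT h) (buildT (size - h))
termination_by size.toNat
decreasing_by
  all_goals
    have hf := Int.fdiv_eq_ediv (a := size) (b := 2)
    simp only [PySem.Int.floordiv] at *
    omega

-- max_alive(node, size): rightmost alive position (the leaf case with size ≠ 1 is unreachable in Python)
def maxAlive : SegT → Int → Int
  | t, size =>
    if size = 1 then 0
    else match t with
      | .leaf _ => 0        -- unreachable in Python (size ≠ 1 at a leaf)
      | .node _ l r =>
        let h := PySem.Int.floordiv size 2
        if 0 < cntOf r then h + maxAlive r (size - h) else maxAlive l h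

-- first_alive(node, size, pos): smallest alive position ≥ pos, or None
def firstAlive : SegT → Int → Int → Option Int
  | t, size, pos =>
    if cntOf t = 0 ∨ size ≤ pos then none
    else if size = 1 then some 0
    else match t with
      | .leaf _ => none          -- unreachable in Python (size ≠ 1 at a leaf)
      | .node _ l r =>
        let h := PySem.Int.floordiv size 2
        match firstAlive l h pos with
        | some q => some q
        | none => (firstAlive r (size - h) (pos - h)).map (fun q => h + q)

-- remove(node, size, pos)
def removeAt : SegT → Int → Int → SegT
  | t, size, pos =>
    if size = 1 then .leaf 0
    else match t with
      | .leaf _ => .leaf 0       -- unreachable in Python (size ≠ 1 at a leaf)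
      | .node c l r =>
        let h := PySem.Int.floordiv size 2
        if pos < h then .node (c - 1) (removeAt l h pos) r
        else .node (c - 1) l (removeAt r (size - h) (pos - h))

-- the for-loop of B over reversed(tasks[:mid])
def bLoop (w : List Int) (strength : Int) : List Int → SegT → Int → Bool
  | [], _, _ => true
  | t :: ts, root, pills =>
    let n : Int := (w.length : Int)
    let p := maxAlive root n
    match PySem.List.pyGet? w p with               -- w[p]
    | none => false
    | some wp =>
      if t ≤ wp then bLoop w strength ts (removeAt root n p) pills
      else if pills ≤ 0 then false
      else
        let pos : Int := (PySem.List.bisectLeft w (t - strength) : Int)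
        match firstAlive root n pos with
        | none => false
        | some q => bLoop w strength ts (removeAt root n q) (pills - 1)

def can_assign_alt (mid : Int) (workers : List Int) (tasks : List Int) (pills : Int) (strength : Int) : Bool :=
  if mid ≤ 0 then true
  else if (workers.length : Int) < mid ∨ (tasks.length : Int) < mid then false
  else
    let w := PySem.List.sorted (PySem.List.slice workers (some (-mid)) none) (fun x => x)
    let root := buildT (w.length : Int)
    bLoop w strength (PySem.List.slice tasks none (some mid)).reverse root pills

-- ===== PRECONDITION & SPEC =====
-- Pre_ excludes 0 < mid with mid exceeding len(tasks) or len(workers): there A raises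
-- IndexError (always when len(tasks) < mid, and when the worker pool empties first);
-- on part of that region A still returns False before exhausting the pool, and B
-- returns False on all of it.
def Pre_can_assign (mid : Int) (workers : List Int) (tasks : List Int) (pills : Int) (strength : Int) : Prop :=
  mid ≤ 0 ∨ (mid ≤ (workers.length : Int) ∧ mid ≤ (tasks.length : Int))
instance (mid : Int) (workers : List Int) (tasks : List Int) (pills : Int) (strength : Int) : Decidable (Pre_can_assign mid workers tasks pills strength) := by unfold Pre_can_assign; infer_instance

def pvWitness_can_assign : Int × List Int × List Int × Int × Int := (2, [1, 5, 9], [3, 4], 1, 2)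

def Spec_can_assign (mid : Int) (workers : List Int) (tasks : List Int) (pills : Int) (strength : Int) (out : Bool) : Prop := out = can_assign_alt mid workers tasks pills strength
instance (mid : Int) (workers : List Int) (tasks : List Int) (pills : Int) (strength : Int) (out : Bool) : Decidable (Spec_can_assign mid workers tasks pills strength out) := by unfold Spec_can_assign; infer_instance

-- ===== CLAIM (what is proved, stated in full; the proofs are below) =====
def Claim_equal_can_assign : Prop := ∀ (mid : Int) (workers : List Int) (tasks : List Int) (pills : Int) (strength : Int), Dom_can_assign mid workers tasks pills strength → Pre_can_assign mid workers tasks pills strength → Spec_can_assign mid workers tasks pills strength (can_assign mid workers tasks pills strength)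

-- ===== LEMMAS AND PROOFS =====

-- mask abstraction: select w m = the elements of w at the true positions of m, in order
def select : List Int → List Bool → List Int
  | x :: xs, b :: bs => if b then x :: select xs bs else select xs bs
  | _, _ => []

def cntB (m : List Bool) : Nat := m.countP id

def lastT? : List Bool → Option Nat
  | [] => none
  | b :: bs =>
    match lastT? bs with
    | some k => some (k + 1)
    | none => if b then some 0 else none

def firstT? : List Bool → Int → Option Nat
  | [], _ => none
  | b :: bs, pos => if b ∧ pos ≤ 0 then some 0 else (firstT? bs (pos - 1)).map (· + 1)

-- Models T m : T is a well-formed tree over exactly the mask m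
inductive Models : SegT → List Bool → Prop
  | leaf (b : Bool) : Models (.leaf (if b then 1 else 0)) [b]
  | node (l r : SegT) (ml mr : List Bool) :
      Models l ml → Models r mr →
      2 ≤ ml.length + mr.length →
      (ml.length : Int) = PySem.Int.floordiv ((ml.length : Int) + (mr.length : Int)) 2 →
      Models (.node ((cntB ml : Int) + (cntB mr : Int)) l r) (ml ++ mr)

theorem lastT?_append (ml mr : List Bool) :
    lastT? (ml ++ mr) = match lastT? mr with
      | some k => some (ml.length + k)
      | none => lastT? ml := by
  induction ml with
  | nil => cases hmr : lastT? mr <;> simp [hmr, lastT?]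
  | cons b bs ih =>
    simp only [List.cons_append, lastT?, ih]
    cases hmr : lastT? mr <;> cases hbs : lastT? bs <;> simp [Nat.add_assoc, Nat.add_comm, Nat.add_left_comm]

theorem lastT?_none_iff (m : List Bool) : lastT? m = none ↔ cntB m = 0 := by
  induction m with
  | nil => simp [lastT?, cntB]
  | cons b bs ih =>
    simp only [lastT?, cntB, List.countP_cons]
    cases hbs : lastT? bs <;> cases b <;> simp_all [cntB, id]

theorem models_length_pos {T m} (h : Models T m) : 1 ≤ m.length := by
  induction h with
  | leaf b => simp
  | node l r ml mr hl hr hlen hsplit ihl ihr => simp; omega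

theorem firstT?_none_of_cnt0 {m : List Bool} (h : cntB m = 0) (pos : Int) : firstT? m pos = none := by
  induction m generalizing pos with
  | nil => rfl
  | cons b bs ih =>
    simp only [cntB, List.countP_cons] at h
    have hb : b = false := by cases b <;> simp_all [id]
    subst hb
    simp [firstT?, ih (by simpa [cntB] using (by omega : List.countP id bs = 0))]

theorem firstT?_none_of_ge {m : List Bool} {pos : Int} (h : (m.length : Int) ≤ pos) : firstT? m pos = none := by
  induction m generalizing pos with
  | nil => rfl
  | cons b bs ih =>
    simp only [List.length_cons] at h
    have : ¬ (b = true ∧ pos ≤ 0) := by push_cast at h; rintro ⟨_, h0⟩; omega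
    simp [firstT?, this, ih (pos := pos - 1) (by push_cast at h ⊢; omega)]

theorem firstT?_append (ml mr : List Bool) (pos : Int) :
    firstT? (ml ++ mr) pos = match firstT? ml pos with
      | some q => some q
      | none => (firstT? mr (pos - (ml.length : Int))).map (· + ml.length) := by
  induction ml generalizing pos with
  | nil => simp [firstT?]
  | cons b bs ih =>
    simp only [List.cons_append, firstT?, ih]
    by_cases hb : b = true ∧ pos ≤ 0
    · simp [hb]
    · simp only [hb, if_false]
      cases hbs : firstT? bs (pos - 1)
      · simp only [Option.map_none, List.length_cons]
        cases hmr : firstT? mr (pos - 1 - (bs.length : Int))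
        · have : pos - 1 - (bs.length : Int) = pos - ((bs.length : Int) + 1) := by ring
          rw [this] at hmr
          simp [hmr]
        · have : pos - 1 - (bs.length : Int) = pos - ((bs.length : Int) + 1) := by ring
          rw [this] at hmr
          simp [hmr]
          push_cast
          omega
      · simp [hbs]

theorem cnt_of_models {T m} (h : Models T m) : cntOf T = (cntB m : Int) := by
  induction h with
  | leaf b => cases b <;> simp [cntOf, cntB]
  | node l r ml mr hl hr hlen hsplit ihl ihr =>
    simp [cntOf, cntB, List.countP_append]

-- lastT? over an append

theorem build_models (k : Nat) (hk : 1 ≤ k) : Models (buildT (k : Int)) (List.replicate k true) := by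
  induction k using Nat.strong_induction_on with
  | _ k ih =>
    by_cases h1 : k = 1
    · subst h1
      rw [buildT]
      simpa using Models.leaf true
    · have h2 : 2 ≤ k := by omega
      rw [buildT]
      have hk2 : ¬ ((k : Int) ≤ 1) := by push_cast; omega
      simp only [hk2, if_false]
      have hf := Int.fdiv_eq_ediv (a := (k:Int)) (b := 2)
      have hfd : PySem.Int.floordiv (k : Int) 2 = ((k / 2 : Nat) : Int) := by
        simp only [PySem.Int.floordiv]
        omega
      set h : Nat := k / 2 with hh
      have h1h : 1 ≤ h := by omega
      have hlt : h < k := by omega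
      have h2h : 1 ≤ k - h := by omega
      have hlt2 : k - h < k := by omega
      have hml := ih h hlt h1h
      have hmr := ih (k - h) hlt2 h2h
      have hrepl : List.replicate k true = List.replicate h true ++ List.replicate (k - h) true := by
        rw [← List.replicate_add]
        congr 1
        omega
      rw [hrepl, hfd]
      have hsize : ((k : Int) - ((h:Nat) : Int)) = (((k - h : Nat)) : Int) := by push_cast; omega
      rw [hsize]
      have := Models.node _ _ _ _ hml hmr (by simp; omega)
        (by simp only [List.length_replicate]
            have hkk : ((h : Nat) : Int) + (((k - h : Nat)) : Int) = (k : Int) := by push_cast; omega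
            rw [hkk, hfd])
      have hcnt : (k : Int) = ((cntB (List.replicate h true) : Nat) : Int) + ((cntB (List.replicate (k-h) true) : Nat) : Int) := by
        simp [cntB, List.countP_replicate, id]
        omega
      rw [hcnt]
      exact this

theorem lastT?_isSome_of_cnt {m : List Bool} (h : cntB m ≠ 0) : ∃ k, lastT? m = some k := by
  induction m with
  | nil => simp [cntB] at h
  | cons b bs ih =>
    simp only [lastT?]
    rcases hbs : lastT? bs with _ | k
    · simp only [cntB, List.countP_cons] at h
      have hbs0 : cntB bs = 0 := by
        by_contra hc
        rcases ih hc with ⟨k, hk⟩; simp [hk] at hbs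
      cases b
      · exfalso
        have h0 : List.countP id bs = 0 := hbs0
        simp [h0] at h
      · exact ⟨0, by simp⟩
    · exact ⟨k + 1, rfl⟩

theorem lastT?_spec {m : List Bool} {k : Nat} (h : lastT? m = some k) : k < m.length ∧ m[k]! = true := by
  induction m generalizing k with
  | nil => simp [lastT?] at h
  | cons b bs ih =>
    simp only [lastT?] at h
    rcases hbs : lastT? bs with _ | k'
    · rw [hbs] at h
      cases b
      · simp at h
      · have h0 : k = 0 := by simpa using h.symm
        subst h0
        simp
    · rw [hbs] at h
      simp only [Option.some_inj] at h
      rcases ih hbs with ⟨h1, h2⟩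
      subst h
      refine ⟨by simpa using Nat.succ_lt_succ h1, by simpa using h2⟩

theorem maxAlive_eq {T m k} (hM : Models T m) (h : lastT? m = some k) :
    maxAlive T (m.length : Int) = (k : Int) := by
  induction hM generalizing k with
  | leaf b =>
    cases b
    · simp [lastT?] at h
    · simp [lastT?] at h
      subst h
      rfl
  | node l r ml mr hl hr hlen hsplit ihl ihr =>
    have hLpos := models_length_pos hl
    have hRpos := models_length_pos hr
    rw [lastT?_append] at h
    rw [maxAlive]
    have hne : ¬ (((ml ++ mr).length : Int) = 1) := by simp; omega
    simp only [hne, if_false]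
    have hh : PySem.Int.floordiv (((ml ++ mr).length : Nat) : Int) 2 = (ml.length : Int) := by
      rw [hsplit]; congr 1; push_cast; simp
    simp only [hh, cnt_of_models hr]
    have hsz : (((ml ++ mr).length : Nat) : Int) - (ml.length : Int) = (mr.length : Int) := by
      push_cast; simp
    rw [hsz]
    rcases hmr : lastT? mr with _ | k2
    · rw [hmr] at h
      have hc0 : cntB mr = 0 := (lastT?_none_iff mr).1 hmr
      simp only [hc0]
      simpa using ihl h
    · rw [hmr] at h
      simp only [Option.some_inj] at h
      subst h
      have hcpos : cntB mr ≠ 0 := by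
        intro hc; rw [(lastT?_none_iff mr).2 hc] at hmr; cases hmr
      have : (0:Int) < (cntB mr : Int) := by omega
      simp only [this, if_true]
      rw [ihr hmr]
      push_cast
      ring

theorem firstAlive_eq {T m} (hM : Models T m) (pos : Int) :
    firstAlive T (m.length : Int) pos = (firstT? m pos).map (fun q => (q : Int)) := by
  induction hM generalizing pos with
  | leaf b =>
    rw [firstAlive]
    cases b
    · simp [cntOf, firstT?]
    · by_cases hp : pos ≤ 0
      · simp [firstT?, hp, cntOf]
        omega
      · simp [firstT?, hp, cntOf]
        omega
  | node l r ml mr hl hr hlen hsplit ihl ihr =>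
    have hLpos := models_length_pos hl
    have hRpos := models_length_pos hr
    rw [firstAlive]
    have hcnt : cntOf (SegT.node ((cntB ml : Int) + (cntB mr : Int)) l r) = (cntB ml : Int) + (cntB mr : Int) := rfl
    by_cases hg : ((cntB ml : Int) + (cntB mr : Int) = 0) ∨ (((ml ++ mr).length : Nat) : Int) ≤ pos
    · rw [hcnt]
      simp only [hg, if_true]
      rcases hg with hg | hg
      · have h1 : cntB ml = 0 := by omega
        have h2 : cntB mr = 0 := by omega
        have : cntB (ml ++ mr) = 0 := by
          unfold cntB at h1 h2 ⊢
          rw [List.countP_append]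
          omega
        rw [firstT?_none_of_cnt0 this]
        rfl
      · rw [firstT?_none_of_ge hg]
        rfl
    · rw [hcnt]
      simp only [hg, if_false]
      have hne : ¬ ((((ml ++ mr).length : Nat) : Int) = 1) := by
        rw [List.length_append]; push_cast; omega
      simp only [hne, if_false]
      have hh : PySem.Int.floordiv (((ml ++ mr).length : Nat) : Int) 2 = (ml.length : Int) := by
        rw [hsplit]; congr 1; push_cast; simp
      simp only [hh]
      have hsz : (((ml ++ mr).length : Nat) : Int) - (ml.length : Int) = (mr.length : Int) := by
        push_cast; simp
      rw [hsz, ihl, ihr, firstT?_append]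
      cases hml : firstT? ml pos
      · cases hmr : firstT? mr (pos - (ml.length : Int))
        · simp [hmr]
        · simp [hmr]
          ring
      · simp [hml]

theorem cntB_set_false {m : List Bool} {p : Nat} (hp : p < m.length) (ht : m[p]! = true) :
    cntB (m.set p false) + 1 = cntB m := by
  induction m generalizing p with
  | nil => simp at hp
  | cons b bs ih =>
    cases p with
    | zero => simp_all [cntB, List.countP_cons, id]
    | succ q =>
      simp only [List.length_cons, Nat.succ_lt_succ_iff] at hp
      have := ih (p := q) hp (by simpa using ht)
      simp only [List.set_cons_succ, cntB, List.countP_cons] at *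
      omega

theorem getElemBang_append_left {ml mr : List Bool} {p : Nat} (hp : p < ml.length) :
    (ml ++ mr)[p]! = ml[p]! := by
  simp [List.getElem!_eq_getElem?_getD, List.getElem?_append_left hp]

theorem getElemBang_append_right {ml mr : List Bool} {p : Nat} (hp : ml.length ≤ p) :
    (ml ++ mr)[p]! = mr[p - ml.length]! := by
  simp [List.getElem!_eq_getElem?_getD, List.getElem?_append_right hp]

theorem removeAt_models {T m} (hM : Models T m) (p : Nat) (hp : p < m.length) (ht : m[p]! = true) :
    Models (removeAt T (m.length : Int) (p : Int)) (m.set p false) := by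
  induction hM generalizing p with
  | leaf b =>
    simp only [List.length_singleton] at hp
    have hp0 : p = 0 := by omega
    subst hp0
    rw [removeAt]
    norm_num
    simpa using Models.leaf false
  | node l r ml mr hl hr hlen hsplit ihl ihr =>
    have hLpos := models_length_pos hl
    have hRpos := models_length_pos hr
    rw [removeAt]
    have hne : ¬ ((((ml ++ mr).length : Nat) : Int) = 1) := by
      rw [List.length_append]; push_cast; omega
    simp only [hne, if_false]
    have hh : PySem.Int.floordiv (((ml ++ mr).length : Nat) : Int) 2 = (ml.length : Int) := by
      rw [hsplit]; congr 1; push_cast; simp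
    simp only [hh]
    rw [List.length_append] at hp
    by_cases hpl : p < ml.length
    · have hcast : ((p : Nat) : Int) < (ml.length : Int) := by push_cast; omega
      simp only [hcast, if_true]
      have htl : ml[p]! = true := by rw [← getElemBang_append_left (mr := mr) hpl]; exact ht
      have hset : (ml ++ mr).set p false = ml.set p false ++ mr :=
        List.set_append_left _ _ hpl
      rw [hset]
      have hcnt : (cntB ml : Int) + (cntB mr : Int) - 1
          = ((cntB (ml.set p false) : Nat) : Int) + (cntB mr : Int) := by
        have := cntB_set_false (m := ml) hpl htl
        omega
      rw [hcnt]
      exact Models.node _ _ _ _ (ihl p hpl htl) hr (by simpa using hlen) (by simpa using hsplit)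
    · have hpr : p - ml.length < mr.length := by omega
      have hcast : ¬ (((p : Nat) : Int) < (ml.length : Int)) := by push_cast; omega
      simp only [hcast, if_false]
      have htr : mr[p - ml.length]! = true := by
        rw [← getElemBang_append_right (mr := mr) (by omega)]; exact ht
      have hset : (ml ++ mr).set p false = ml ++ mr.set (p - ml.length) false :=
        List.set_append_right _ _ (by omega)
      rw [hset]
      have hsz : (((ml ++ mr).length : Nat) : Int) - (ml.length : Int) = (mr.length : Int) := by
        push_cast; simp
      have hpos : ((p : Nat) : Int) - (ml.length : Int) = (((p - ml.length : Nat)) : Int) := by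
        push_cast; omega
      rw [hsz, hpos]
      have hcnt : (cntB ml : Int) + (cntB mr : Int) - 1
          = (cntB ml : Int) + ((cntB (mr.set (p - ml.length) false) : Nat) : Int) := by
        have := cntB_set_false (m := mr) hpr htr
        omega
      rw [hcnt]
      exact Models.node _ _ _ _ hl (ihr _ hpr htr) (by simpa using hlen) (by simpa using hsplit)


theorem select_sublist (w : List Int) (m : List Bool) : (select w m).Sublist w := by
  induction w generalizing m with
  | nil => cases m <;> simp [select]
  | cons x xs ih =>
    cases m with
    | nil => simp [select]
    | cons b bs =>
      cases b
      · simpa [select] using (ih bs).cons x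
      · simpa [select] using (ih bs).cons₂ x

theorem select_replicate (w : List Int) : select w (List.replicate w.length true) = w := by
  induction w with
  | nil => simp [select]
  | cons x xs ih => simpa [select, List.replicate_succ] using ih

theorem select_nil_of_lastT?_none {w : List Int} {m : List Bool} (h : lastT? m = none) :
    select w m = [] := by
  induction m generalizing w with
  | nil => cases w <;> simp [select]
  | cons b bs ih =>
    simp only [lastT?] at h
    rcases hbs : lastT? bs with _ | k
    · rw [hbs] at h
      cases b
      · cases w with
        | nil => simp [select]
        | cons x xs => simpa [select] using ih (w := xs) hbs
      · simp at h
    · rw [hbs] at h; simp at h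

theorem select_last {w : List Int} {m : List Bool} {k : Nat}
    (hlen : m.length = w.length) (h : lastT? m = some k) :
    select w m = select w (m.set k false) ++ [w[k]!] := by
  induction m generalizing w k with
  | nil => simp [lastT?] at h
  | cons b bs ih =>
    cases w with
    | nil => simp at hlen
    | cons x xs =>
      simp only [List.length_cons, Nat.succ_inj] at hlen
      simp only [lastT?] at h
      rcases hbs : lastT? bs with _ | k'
      · rw [hbs] at h
        cases b
        · simp at h
        · simp only [if_true] at h
          have h0 : k = 0 := by simpa using h.symm
          subst h0
          simp [select, select_nil_of_lastT?_none (w := xs) hbs,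
            select_nil_of_lastT?_none (w := xs) hbs]
      · rw [hbs] at h
        simp only [Option.some_inj] at h
        subst h
        have := ih (w := xs) hlen hbs
        cases b <;> simp [select, this]

-- pill-branch characterisation of firstT? against the sorted array w
theorem firstT?_pill {w : List Int} {m : List Bool} (x pos : Int)
    (hlen : m.length = w.length)
    (hpos : ∀ i : Nat, i < w.length → (pos ≤ (i : Int) ↔ x ≤ w[i]!)) :
    (firstT? m pos = none → ∀ y ∈ select w m, y < x) ∧
    (∀ q, firstT? m pos = some q →
      ∃ L R, q < m.length ∧ m[q]! = true ∧ x ≤ w[q]! ∧ (∀ y ∈ L, y < x) ∧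
        select w m = L ++ w[q]! :: R ∧ select w (m.set q false) = L ++ R) := by
  induction m generalizing w pos with
  | nil =>
    refine ⟨fun _ y hy => ?_, fun q hq => by simp [firstT?] at hq⟩
    cases w <;> simp [select] at hy
  | cons b bs ih =>
    cases w with
    | nil => simp at hlen
    | cons a xs =>
      simp only [List.length_cons, Nat.succ_inj] at hlen
      have hx0 := hpos 0 (by simp)
      have hpos' : ∀ i : Nat, i < xs.length → (pos - 1 ≤ (i : Int) ↔ x ≤ xs[i]!) := by
        intro i hi
        have h := hpos (i + 1) (by simpa using Nat.succ_lt_succ hi)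
        have hidx : (a :: xs)[i + 1]! = xs[i]! := by
          simp [List.getElem!_eq_getElem?_getD]
        rw [hidx] at h
        constructor
        · intro hle
          exact h.1 (by push_cast at hle ⊢; omega)
        · intro hle
          have := h.2 hle
          push_cast at this ⊢
          omega
      have IH := ih (w := xs) (pos := pos - 1) hlen hpos'
      by_cases hcase : b = true ∧ pos ≤ 0
      · -- q = 0
        rcases hcase with ⟨hb, hp0⟩
        subst hb
        refine ⟨fun hnone => by simp [firstT?, hp0] at hnone, fun q hq => ?_⟩
        simp only [firstT?, hp0, and_self, if_true] at hq
        have hq0 : q = 0 := by simpa using hq.symm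
        subst hq0
        refine ⟨[], select xs bs, by simp, by simp, ?_, by simp, ?_, ?_⟩
        · have := (hx0.1 hp0)
          simpa [List.getElem!_eq_getElem?_getD] using this
        · simp [select, List.getElem!_eq_getElem?_getD]
        · simp [select]
      · have hne : ¬ (b = true ∧ pos ≤ 0) := hcase
        constructor
        · intro hnone y hy
          simp only [firstT?, hne, if_false, Option.map_eq_none_iff] at hnone
          have htail := IH.1 hnone
          cases b with
          | false => exact htail y (by simpa [select] using hy)
          | true =>
            have hpgt : ¬ pos ≤ 0 := fun h => hne ⟨rfl, h⟩
            have ha : a < x := by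
              have := hx0
              simp only [List.getElem!_eq_getElem?_getD] at this
              simp only [List.getElem?_cons_zero, Option.getD_some] at this
              by_contra hax
              push_neg at hax
              exact hpgt (this.2 (by omega))
            rcases (by simpa [select] using hy : y = a ∨ y ∈ select xs bs) with rfl | hy'
            · exact ha
            · exact htail y hy'
        · intro q hq
          simp only [firstT?, hne, if_false] at hq
          rcases hq' : firstT? bs (pos - 1) with _ | q'
          · rw [hq'] at hq; simp at hq
          · rw [hq'] at hq
            simp only [Option.map_some, Option.some_inj] at hq
            subst hq
            rcases IH.2 q' hq' with ⟨L, R, hql, hqt, hqx, hL, hsel, hsel'⟩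
            have hidx : (a :: xs)[q' + 1]! = xs[q']! := by
              simp [List.getElem!_eq_getElem?_getD]
            cases b with
            | false =>
              refine ⟨L, R, by simpa using Nat.succ_lt_succ hql, by simpa using hqt, by rw [hidx]; exact hqx, hL, ?_, ?_⟩
              · simpa [select, hidx] using hsel
              · simpa [select] using hsel'
            | true =>
              have hpgt : ¬ pos ≤ 0 := fun h => hne ⟨rfl, h⟩
              have ha : a < x := by
                have := hx0
                simp only [List.getElem!_eq_getElem?_getD, List.getElem?_cons_zero, Option.getD_some] at this
                by_contra hax
                push_neg at hax
                exact hpgt (this.2 (by omega))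
              refine ⟨a :: L, R, by simpa using Nat.succ_lt_succ hql, by simpa using hqt, by rw [hidx]; exact hqx, ?_, ?_, ?_⟩
              · intro y hy
                rcases List.mem_cons.1 hy with rfl | hy'
                · exact ha
                · exact hL y hy'
              · simpa [select, hidx] using hsel
              · simpa [select] using hsel'

theorem bisect_split {s L R : List Int} {x : Int} (hs : s.Pairwise (· ≤ ·))
    (hsplit : s = L ++ R) (hL : ∀ y ∈ L, y < x) (hR : ∀ y ∈ R, x ≤ y) :
    PySem.List.bisectLeft s x = L.length := by
  rcases PySem.List.bisectLeft_spec s x hs with ⟨hle, hlt, hge⟩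
  set b := PySem.List.bisectLeft s x with hb
  have hlenL : L.length ≤ s.length := by subst hsplit; simp
  rcases Nat.lt_trichotomy b L.length with hc | hc | hc
  · exfalso
    have hbs : b < s.length := by omega
    have h1 : x ≤ s[b] := hge b hbs le_rfl
    have h2 : s[b] ∈ L := by
      subst hsplit
      rw [List.getElem_append_left hc]
      exact List.getElem_mem _
    exact absurd h1 (by have := hL _ h2; omega)
  · exact hc.symm ▸ rfl
  · exfalso
    have hbs : L.length < s.length := by
      rcases R with _ | ⟨r0, R'⟩
      · subst hsplit; simp at hle; omega
      · subst hsplit; simp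
    have h1 : s[L.length] < x := hlt L.length hbs hc
    have h2 : x ≤ s[L.length] := by
      apply hR
      subst hsplit
      rw [List.getElem_append_right (le_refl L.length)]
      exact List.getElem_mem _
    omega

theorem eraseIdx_append_cons (L : List Int) (a : Int) (R : List Int) :
    (L ++ a :: R).eraseIdx L.length = L ++ R := by
  induction L with
  | nil => rfl
  | cons y ys ih => simpa [List.eraseIdx] using ih

-- main loop equivalence
theorem pyGet?_of_lt {w : List Int} {k : Nat} (h : k < w.length) :
    PySem.List.pyGet? w (k : Int) = some w[k]! := by
  rw [PySem.List.pyGet?_natCast]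
  simp [List.getElem?_eq_getElem h, List.getElem!_eq_getElem?_getD]

theorem loop_eq (w : List Int) (hsort : w.Pairwise (· ≤ ·)) (strength : Int) :
    ∀ (k : Nat) (tasks : List Int) (m : List Bool) (T : SegT) (pills : Int),
      Models T m → m.length = w.length → cntB m = k → k ≤ tasks.length →
      aLoop tasks strength (PySem.List.pyRange ((k : Int) - 1) (-1) (-1)) (select w m) pills
        = bLoop w strength ((List.take k tasks).reverse) T pills := by
  intro k
  induction k with
  | zero =>
    intro tasks m T pills hM hlen hcnt hk
    rw [PySem.List.pyRange_neg_one_eq_nil (by omega)]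
    simp [aLoop, bLoop]
  | succ k' ih =>
    intro tasks m T pills hM hlen hcnt hk
    have hk' : k' < tasks.length := by omega
    -- index list and reversed-prefix list
    have hrange : PySem.List.pyRange (((k' + 1 : Nat) : Int) - 1) (-1) (-1)
        = (k' : Int) :: PySem.List.pyRange (((k' : Nat) : Int) - 1) (-1) (-1) := by
      have h1 : (((k' + 1 : Nat) : Int) - 1) = (k' : Int) := by push_cast; ring
      rw [h1, PySem.List.pyRange_neg_one_cons (by omega)]
    have htake : (List.take (k' + 1) tasks).reverse
        = tasks[k']! :: (List.take k' tasks).reverse := by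
      rw [List.take_succ]
      simp [List.getElem?_eq_getElem hk', List.getElem!_eq_getElem?_getD]
    rw [hrange, htake]
    -- the current task value
    have htask : PySem.List.pyGet? tasks ((k' : Nat) : Int) = some tasks[k']! :=
      pyGet?_of_lt hk'
    -- the strongest remaining worker
    have hcne : cntB m ≠ 0 := by omega
    rcases lastT?_isSome_of_cnt hcne with ⟨kl, hlast⟩
    rcases lastT?_spec hlast with ⟨hkl, hklt⟩
    have hklw : kl < w.length := by omega
    have hselL := select_last (w := w) hlen hlast
    have husable : PySem.List.pyGet? (select w m) (-1) = some (w[kl]!) := by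
      rw [hselL]
      exact PySem.List.pyGet?_neg_one_append_singleton _ _
    have hmax : maxAlive T ((w.length : Nat) : Int) = ((kl : Nat) : Int) := by
      rw [← hlen]
      exact maxAlive_eq hM hlast
    -- unfold one step of both loops
    rw [aLoop, bLoop]
    simp only [htask, husable, hmax, pyGet?_of_lt hklw]
    -- new state after removing the strongest worker
    have hMs : Models (removeAt T ((w.length : Nat) : Int) ((kl : Nat) : Int)) (m.set kl false) := by
      rw [← hlen]; exact removeAt_models hM kl hkl hklt
    have hlens : (m.set kl false).length = w.length := by simpa using hlen
    have hcnts : cntB (m.set kl false) = k' := by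
      have := cntB_set_false hkl hklt
      omega
    by_cases hbr : tasks[k']! ≤ w[kl]!
    · simp only [hbr, if_true]
      have hpop : PySem.List.pop? (select w m) (-1)
          = some (w[kl]!, select w (m.set kl false)) := by
        rw [hselL]
        exact PySem.List.pop?_last _ _
      rw [hpop]
      exact ih tasks (m.set kl false) _ pills hMs hlens hcnts (by omega)
    · simp only [hbr, if_false]
      by_cases hpill : pills ≤ 0
      · simp [hpill]
      · simp only [hpill, if_false]
        set x := tasks[k']! - strength with hx
        -- hypothesis linking the bisect position on w to the threshold x
        rcases PySem.List.bisectLeft_spec w x hsort with ⟨hble, hblt, hbge⟩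
        have hposH : ∀ i : Nat, i < w.length →
            (((PySem.List.bisectLeft w x : Nat) : Int) ≤ (i : Int) ↔ x ≤ w[i]!) := by
          intro i hi
          constructor
          · intro hle
            have : PySem.List.bisectLeft w x ≤ i := by exact_mod_cast hle
            have := hbge i hi this
            simpa [List.getElem!_eq_getElem?_getD, List.getElem?_eq_getElem hi] using this
          · intro hle
            by_contra hc
            have hilt : i < PySem.List.bisectLeft w x := by omega
            have := hblt i hi hilt
            rw [List.getElem!_eq_getElem?_getD, List.getElem?_eq_getElem hi] at hle
            simp at hle
            omega
        have hpill2 := firstT?_pill (w := w) (m := m) x ((PySem.List.bisectLeft w x : Nat) : Int) hlen hposH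
        have hfa : firstAlive T ((w.length : Nat) : Int) ((PySem.List.bisectLeft w x : Nat) : Int)
            = (firstT? m ((PySem.List.bisectLeft w x : Nat) : Int)).map (fun q => (q : Int)) := by
          rw [← hlen]
          exact firstAlive_eq hM _
        have hupw : (select w m).Pairwise (· ≤ ·) := List.Pairwise.sublist (select_sublist w m) hsort
        rcases hft : firstT? m ((PySem.List.bisectLeft w x : Nat) : Int) with _ | q
        · -- no boostable worker: both return False
          rw [hft] at hfa
          simp only [hfa, Option.map_none]
          have hall := hpill2.1 hft
          have hbu : PySem.List.bisectLeft (select w m) x = (select w m).length := by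
            have := bisect_split (L := select w m) (R := []) hupw (by simp) hall (by simp)
            simpa using this
          simp [hbu]
        · rw [hft] at hfa
          rcases hpill2.2 q hft with ⟨L, R, hql, hqt, hqx, hLlt, hsel, hsel'⟩
          have hqw : q < w.length := by omega
          -- every element at or after the found position is ≥ x
          have hge2 : ∀ y ∈ w[q]! :: R, x ≤ y := by
            intro y hy
            rcases List.mem_cons.1 hy with rfl | hy'
            · exact hqx
            · have hp : (w[q]! :: R).Pairwise (· ≤ ·) := by
                have := hsel ▸ hupw
                exact (List.pairwise_append.1 this).2.1
              have := (List.pairwise_cons.1 hp).1 y hy'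
              omega
          have hbu : PySem.List.bisectLeft (select w m) x = L.length :=
            bisect_split hupw hsel hLlt hge2
          have hlenu : L.length < (select w m).length := by
            rw [hsel]
            simp
          have hneq : L.length ≠ (select w m).length := by omega
          have hera : (select w m).eraseIdx L.length = select w (m.set q false) := by
            rw [hsel, eraseIdx_append_cons, hsel']
          rw [hfa]
          simp only [hbu, Option.map_some, if_neg hneq, PySem.List.pop?_natCast _ _ hlenu, hera]
          have hMq : Models (removeAt T ((w.length : Nat) : Int) ((q : Nat) : Int)) (m.set q false) := by
            rw [← hlen]; exact removeAt_models hM q hql hqt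
          have hlenq : (m.set q false).length = w.length := by simpa using hlen
          have hcntq : cntB (m.set q false) = k' := by
            have := cntB_set_false hql hqt
            omega
          exact ih tasks (m.set q false) _ (pills - 1) hMq hlenq hcntq (by omega)

-- ===== VERDICT (by name: the statement is the Claim_ definition above) =====
theorem can_assign_spec : Claim_equal_can_assign := by
  intro mid workers tasks pills strength hdom hpre
  unfold Spec_can_assign
  unfold can_assign can_assign_alt
  by_cases hmid : mid ≤ 0
  · rw [PySem.List.pyRange_neg_one_eq_nil (by omega)]
    simp [aLoop, hmid]
  · have hpre' : mid ≤ (workers.length : Int) ∧ mid ≤ (tasks.length : Int) := by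
      rcases hpre with h | h
      · omega
      · exact h
    obtain ⟨hwl, htl⟩ := hpre'
    have hguard : ¬ ((workers.length : Int) < mid ∨ (tasks.length : Int) < mid) := by omega
    simp only [hmid, if_false, hguard]
    set M := mid.toNat with hM
    have hmid1 : 1 ≤ M := by omega
    have hmidM : mid = (M : Int) := by omega
    have hMw : M ≤ workers.length := by omega
    have hMt : M ≤ tasks.length := by omega
    rw [hmidM]
    rw [PySem.List.slice_from_neg_natCast workers M (by omega)]
    rw [PySem.List.slice_to tasks (by positivity)]
    set w := PySem.List.sorted (List.drop (workers.length - M) workers) (fun x => x) with hwdef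
    have hsort : w.Pairwise (· ≤ ·) := PySem.List.sorted_pairwise _ _
    have hwlen : w.length = M := by
      rw [hwdef, PySem.List.length_sorted, List.length_drop]
      omega
    have htoNat : ((M : Int)).toNat = M := by omega
    rw [htoNat]
    have hMod : Models (buildT ((w.length : Nat) : Int)) (List.replicate M true) := by
      rw [hwlen]
      exact build_models M hmid1
    have hsel : select w (List.replicate M true) = w := by
      rw [← hwlen]
      exact select_replicate w
    have hcnt : cntB (List.replicate M true) = M := by
      simp [cntB, List.countP_replicate, id]
    have := loop_eq w hsort strength M tasks (List.replicate M true)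
      (buildT ((w.length : Nat) : Int)) pills hMod (by simp [hwlen]) hcnt hMt
    rw [hsel] at this
    exact this
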